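-- pv_equiv track=rewrite | github.com/BartmossMurphy2077/NLP_Final_project | src/modeling/logging_utils.py | build_prediction_rows
-- ===== SOURCE A (Python) =====
-- ID_TO_LABEL = {0: "negative", 1: "neutral", 2: "positive"}
--
-- def build_prediction_rows(
--     ids: list[str],
--     base_ids: list[str],
--     texts: list[str],
--     gold_labels: list[int],
--     pred_labels: list[int],
--     split_name: str,
--     text_variants: list[str],
--     slang_labels: list[str],
-- ) -> tuple[list[dict[str, str]], list[dict[str, str]]]:
--     all_rows: list[dict[str, str]] = []
--     bad_rows: list[dict[str, str]] = []
--
--     for sample_id, base_id, text, gold, pred, text_variant, slang_label in zip(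
--         ids, base_ids, texts, gold_labels, pred_labels, text_variants, slang_labels
--     ):
--         row = {
--             "id": sample_id,
--             "base_id": base_id,
--             "split": split_name,
--             "text_variant": text_variant,
--             "slang_label": slang_label,
--             "text": text,
--             "gold_label": ID_TO_LABEL[gold],
--             "pred_label": ID_TO_LABEL[pred],
--             "is_misclassified": str(int(gold != pred)),
--         }
--         all_rows.append(row)
--         if gold != pred:
--             bad_rows.append(row)
--
--     return all_rows, bad_rows
-- ===== SOURCE B (Python) =====
-- ID_TO_LABELS = ["negative", "neutral", "positive"]
--
-- KEYS = ("id", "base_id", "split", "text_variant", "slang_label", "text",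
--         "gold_label", "pred_label", "is_misclassified")
--
--
-- def build_prediction_rows(
--     ids,
--     base_ids,
--     texts,
--     gold_labels,
--     pred_labels,
--     split_name,
--     text_variants,
--     slang_labels,
-- ):
--     # Columnar construction: build the nine columns of the table first,
--     # transpose them into rows, then select the misclassified rows by the
--     # precomputed flag column.
--     n = min(len(ids), len(base_ids), len(texts), len(gold_labels),
--             len(pred_labels), len(text_variants), len(slang_labels))
--     golds = gold_labels[:n]
--     preds = pred_labels[:n]
--     flags = ["1" if g != p else "0" for g, p in zip(golds, preds)]
--     columns = [
--         ids[:n],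
--         base_ids[:n],
--         [split_name] * n,
--         text_variants[:n],
--         slang_labels[:n],
--         texts[:n],
--         [ID_TO_LABELS[g] for g in golds],
--         [ID_TO_LABELS[p] for p in preds],
--         flags,
--     ]
--     all_rows = [dict(zip(KEYS, vals)) for vals in zip(*columns)]
--     bad_rows = [row for row, f in zip(all_rows, flags) if f == "1"]
--     return all_rows, bad_rows
-- ===== Notes on version B (the rewrite author's own statement) =====
-- stated objective: alternative
-- what changed: A's single row-wise loop that builds each dict and conditionally appends it is replaced by a columnar algorithm: the nine columns of the output table are built first (truncated to the common length), transposed into row dicts, and the misclassified rows are then selected by the precomputed flag column rather than by re-testing gold != pred per row.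
import Mathlib
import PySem

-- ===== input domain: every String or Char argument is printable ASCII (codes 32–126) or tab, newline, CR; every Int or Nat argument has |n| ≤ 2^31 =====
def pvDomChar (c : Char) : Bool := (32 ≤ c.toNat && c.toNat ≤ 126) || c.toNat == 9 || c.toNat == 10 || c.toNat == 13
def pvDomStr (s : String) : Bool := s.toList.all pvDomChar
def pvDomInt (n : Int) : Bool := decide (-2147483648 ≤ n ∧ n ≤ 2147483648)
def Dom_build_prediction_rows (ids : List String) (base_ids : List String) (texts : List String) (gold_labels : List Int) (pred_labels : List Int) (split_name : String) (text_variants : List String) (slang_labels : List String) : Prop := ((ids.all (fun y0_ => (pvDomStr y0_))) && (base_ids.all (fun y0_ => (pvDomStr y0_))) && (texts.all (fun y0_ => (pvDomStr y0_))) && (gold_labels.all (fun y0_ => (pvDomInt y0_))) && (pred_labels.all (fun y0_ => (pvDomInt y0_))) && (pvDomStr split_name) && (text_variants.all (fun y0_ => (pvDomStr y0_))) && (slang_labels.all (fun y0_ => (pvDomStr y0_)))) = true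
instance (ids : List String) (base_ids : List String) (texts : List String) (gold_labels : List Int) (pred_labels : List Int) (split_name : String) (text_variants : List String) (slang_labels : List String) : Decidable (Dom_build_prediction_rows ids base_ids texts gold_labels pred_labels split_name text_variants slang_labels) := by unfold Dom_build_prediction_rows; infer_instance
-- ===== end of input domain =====

-- B builds the output table column-wise (columns, transpose, flag-column selection) instead of A's
-- row-wise loop; objective: alternative decomposition, same O(n) cost.


-- ===== PORT A =====
-- ID_TO_LABEL = {0: "negative", 1: "neutral", 2: "positive"}
def ID_TO_LABEL : PySem.Dict Int String :=
  PySem.Dict.ofList [(0, "negative"), (1, "neutral"), (2, "positive")]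

-- ID_TO_LABEL[g]: Python raises KeyError for g outside {0,1,2}; those inputs are outside
-- Pre_build_prediction_rows, where the port totalises the lookup with "".
def pyIdToLabel (g : Int) : String := (ID_TO_LABEL.get? g).getD ""

-- zip(ids, base_ids, texts, gold_labels, pred_labels, text_variants, slang_labels): truncates to the shortest
def pyZip7 : List String → List String → List String → List Int → List Int → List String → List String →
    List (String × String × String × Int × Int × String × String)
  | i :: is, b :: bs, t :: ts, g :: gs, p :: ps, v :: vs, s :: ss =>
      (i, b, t, g, p, v, s) :: pyZip7 is bs ts gs ps vs ss
  | _, _, _, _, _, _, _ => []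

-- the row dict of A's loop body (keys are pairwise distinct literals, so a plain assoc list is the dict)
def pyMkRow (sample_id base_id split_name text_variant slang_label text : String) (gold pred : Int) :
    List (String × String) :=
  [("id", sample_id), ("base_id", base_id), ("split", split_name),
   ("text_variant", text_variant), ("slang_label", slang_label), ("text", text),
   ("gold_label", pyIdToLabel gold), ("pred_label", pyIdToLabel pred),
   ("is_misclassified", if gold ≠ pred then "1" else "0")]

def build_prediction_rows (ids : List String) (base_ids : List String) (texts : List String) (gold_labels : List Int) (pred_labels : List Int) (split_name : String) (text_variants : List String) (slang_labels : List String) : (List (List (String × String))) × (List (List (String × String))) :=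
  (pyZip7 ids base_ids texts gold_labels pred_labels text_variants slang_labels).foldl
    (fun acc t =>
      let row := pyMkRow t.1 t.2.1 split_name t.2.2.2.2.2.1 t.2.2.2.2.2.2 t.2.2.1 t.2.2.2.1 t.2.2.2.2.1
      (acc.1 ++ [row], if t.2.2.2.1 ≠ t.2.2.2.2.1 then acc.2 ++ [row] else acc.2))
    ([], [])

-- ===== PORT B =====
-- ID_TO_LABELS[g]: Python list indexing (negative g indexes from the end); IndexError (none) is
-- totalised with "" — those inputs lie outside Pre_build_prediction_rows.
def pyLabelAt (g : Int) : String :=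
  (PySem.List.pyGet? ["negative", "neutral", "positive"] g).getD ""

-- min(len(ids), ..., len(slang_labels))
def pvMinLen7 (ids base_ids texts : List String) (gold_labels pred_labels : List Int)
    (text_variants slang_labels : List String) : Nat :=
  min ids.length (min base_ids.length (min texts.length (min gold_labels.length
    (min pred_labels.length (min text_variants.length slang_labels.length)))))

-- [dict(zip(KEYS, vals)) for vals in zip(*columns)]: transpose the nine columns into row dicts
def pyTranspose9 : List String → List String → List String → List String → List String →
    List String → List String → List String → List String → List (List (String × String))
  | a :: as, b :: bs, c :: cs, d :: ds, e :: es, f :: fs, g :: gs, h :: hs, i :: is =>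
      [("id", a), ("base_id", b), ("split", c), ("text_variant", d), ("slang_label", e),
       ("text", f), ("gold_label", g), ("pred_label", h), ("is_misclassified", i)] ::
        pyTranspose9 as bs cs ds es fs gs hs is
  | _, _, _, _, _, _, _, _, _ => []

def build_prediction_rows_alt (ids : List String) (base_ids : List String) (texts : List String) (gold_labels : List Int) (pred_labels : List Int) (split_name : String) (text_variants : List String) (slang_labels : List String) : (List (List (String × String))) × (List (List (String × String))) :=
  let n := pvMinLen7 ids base_ids texts gold_labels pred_labels text_variants slang_labels
  let golds := gold_labels.take n
  let preds := pred_labels.take n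
  let flags := List.zipWith (fun g p => if g ≠ p then "1" else "0") golds preds
  let all_rows :=
    pyTranspose9 (ids.take n) (base_ids.take n) (List.replicate n split_name)
      (text_variants.take n) (slang_labels.take n) (texts.take n)
      (golds.map pyLabelAt) (preds.map pyLabelAt) flags
  let bad_rows := ((all_rows.zip flags).filter (fun rf => rf.2 == "1")).map (·.1)
  (all_rows, bad_rows)

-- ===== PRECONDITION & SPEC =====
-- Pre_ excludes exactly the inputs on which Python A raises KeyError: a gold or pred label outside
-- {0,1,2} at an index reached by the 7-way zip (i.e. below the minimum of the seven lengths).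
def Pre_build_prediction_rows (ids : List String) (base_ids : List String) (texts : List String) (gold_labels : List Int) (pred_labels : List Int) (split_name : String) (text_variants : List String) (slang_labels : List String) : Prop :=
  let n := pvMinLen7 ids base_ids texts gold_labels pred_labels text_variants slang_labels
  (∀ g ∈ gold_labels.take n, 0 ≤ g ∧ g ≤ 2) ∧ (∀ p ∈ pred_labels.take n, 0 ≤ p ∧ p ≤ 2)
instance (ids : List String) (base_ids : List String) (texts : List String) (gold_labels : List Int) (pred_labels : List Int) (split_name : String) (text_variants : List String) (slang_labels : List String) : Decidable (Pre_build_prediction_rows ids base_ids texts gold_labels pred_labels split_name text_variants slang_labels) := by unfold Pre_build_prediction_rows; infer_instance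

def pvWitness_build_prediction_rows : List String × List String × List String × List Int × List Int × String × List String × List String :=
  (["a", "b"], ["x", "y"], ["t1", "t2"], [0, 1], [0, 2], "dev", ["v1", "v2"], ["s1", "s2"])

def Spec_build_prediction_rows (ids : List String) (base_ids : List String) (texts : List String) (gold_labels : List Int) (pred_labels : List Int) (split_name : String) (text_variants : List String) (slang_labels : List String) (out : (List (List (String × String))) × (List (List (String × String)))) : Prop := out = build_prediction_rows_alt ids base_ids texts gold_labels pred_labels split_name text_variants slang_labels
instance (ids : List String) (base_ids : List String) (texts : List String) (gold_labels : List Int) (pred_labels : List Int) (split_name : String) (text_variants : List String) (slang_labels : List String) (out : (List (List (String × String))) × (List (List (String × String)))) : Decidable (Spec_build_prediction_rows ids base_ids texts gold_labels pred_labels split_name text_variants slang_labels out) := by unfold Spec_build_prediction_rows; infer_instance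

-- ===== CLAIM (what is proved, stated in full; the proofs are below) =====
def Claim_equal_build_prediction_rows : Prop := ∀ (ids : List String) (base_ids : List String) (texts : List String) (gold_labels : List Int) (pred_labels : List Int) (split_name : String) (text_variants : List String) (slang_labels : List String), Dom_build_prediction_rows ids base_ids texts gold_labels pred_labels split_name text_variants slang_labels → Pre_build_prediction_rows ids base_ids texts gold_labels pred_labels split_name text_variants slang_labels → Spec_build_prediction_rows ids base_ids texts gold_labels pred_labels split_name text_variants slang_labels (build_prediction_rows ids base_ids texts gold_labels pred_labels split_name text_variants slang_labels)

-- ===== LEMMAS AND PROOFS =====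

-- on the labels A ever looks up (0,1,2), B's list indexing agrees with A's dict lookup
theorem labelAt_eq_idToLabel (g : Int) (h0 : 0 ≤ g) (h2 : g ≤ 2) : pyLabelAt g = pyIdToLabel g := by
  interval_cases g <;> decide

-- A's row as a function of one zipped tuple
def rowOf (sn : String) (t : String × String × String × Int × Int × String × String) :
    List (String × String) :=
  pyMkRow t.1 t.2.1 sn t.2.2.2.2.2.1 t.2.2.2.2.2.2 t.2.2.1 t.2.2.2.1 t.2.2.2.2.1

-- B's flag of one zipped tuple
def flagOf (t : String × String × String × Int × Int × String × String) : String :=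
  if t.2.2.2.1 ≠ t.2.2.2.2.1 then "1" else "0"

-- loop invariant for A's fold: it appends the mapped rows and the (filter-then-map) bad rows
theorem foldl_rows (sn : String) (l : List (String × String × String × Int × Int × String × String))
    (accA accB : List (List (String × String))) :
    l.foldl
      (fun acc t =>
        let row := pyMkRow t.1 t.2.1 sn t.2.2.2.2.2.1 t.2.2.2.2.2.2 t.2.2.1 t.2.2.2.1 t.2.2.2.2.1
        (acc.1 ++ [row], if t.2.2.2.1 ≠ t.2.2.2.2.1 then acc.2 ++ [row] else acc.2))
      (accA, accB)
    = (accA ++ l.map (rowOf sn),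
       accB ++ (l.filter (fun t => decide (t.2.2.2.1 ≠ t.2.2.2.2.1))).map (rowOf sn)) := by
  induction l generalizing accA accB with
  | nil => simp
  | cons t rest ih =>
      rw [List.foldl_cons, ih, List.map_cons, List.filter_cons]
      by_cases h : t.2.2.2.1 = t.2.2.2.2.1 <;> simp [h, rowOf]

-- B's columnar build: the transposed columns are exactly the mapped rows, and the flag column is
-- exactly the mapped flags (under the label-range precondition)
theorem transpose_eq (sn : String) :
    ∀ (ids bs ts : List String) (gs ps : List Int) (vs ss : List String),
    (∀ g ∈ gs.take (pvMinLen7 ids bs ts gs ps vs ss), 0 ≤ g ∧ g ≤ 2) →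
    (∀ p ∈ ps.take (pvMinLen7 ids bs ts gs ps vs ss), 0 ≤ p ∧ p ≤ 2) →
    pyTranspose9 (ids.take (pvMinLen7 ids bs ts gs ps vs ss))
        (bs.take (pvMinLen7 ids bs ts gs ps vs ss))
        (List.replicate (pvMinLen7 ids bs ts gs ps vs ss) sn)
        (vs.take (pvMinLen7 ids bs ts gs ps vs ss))
        (ss.take (pvMinLen7 ids bs ts gs ps vs ss))
        (ts.take (pvMinLen7 ids bs ts gs ps vs ss))
        ((gs.take (pvMinLen7 ids bs ts gs ps vs ss)).map pyLabelAt)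
        ((ps.take (pvMinLen7 ids bs ts gs ps vs ss)).map pyLabelAt)
        (List.zipWith (fun g p => if g ≠ p then "1" else "0")
          (gs.take (pvMinLen7 ids bs ts gs ps vs ss))
          (ps.take (pvMinLen7 ids bs ts gs ps vs ss)))
      = (pyZip7 ids bs ts gs ps vs ss).map (rowOf sn)
    ∧ List.zipWith (fun g p => if g ≠ p then "1" else "0")
        (gs.take (pvMinLen7 ids bs ts gs ps vs ss))
        (ps.take (pvMinLen7 ids bs ts gs ps vs ss))
      = (pyZip7 ids bs ts gs ps vs ss).map flagOf := by
  intro ids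
  induction ids with
  | nil => intro bs ts gs ps vs ss _ _; simp [pvMinLen7, pyTranspose9, pyZip7]
  | cons i is ih =>
      intro bs ts gs ps vs ss hg hp
      rcases bs with _ | ⟨b, bs⟩; · simp [pvMinLen7, pyTranspose9, pyZip7]
      rcases ts with _ | ⟨t, ts⟩; · simp [pvMinLen7, pyTranspose9, pyZip7]
      rcases gs with _ | ⟨g, gs⟩; · simp [pvMinLen7, pyTranspose9, pyZip7]
      rcases ps with _ | ⟨p, ps⟩; · simp [pvMinLen7, pyTranspose9, pyZip7]
      rcases vs with _ | ⟨v, vs⟩; · simp [pvMinLen7, pyTranspose9, pyZip7]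
      rcases ss with _ | ⟨s, ss⟩; · simp [pvMinLen7, pyTranspose9, pyZip7]
      have hmin : pvMinLen7 (i :: is) (b :: bs) (t :: ts) (g :: gs) (p :: ps) (v :: vs) (s :: ss)
          = pvMinLen7 is bs ts gs ps vs ss + 1 := by
        simp [pvMinLen7, List.length_cons, Nat.succ_min_succ]
      rw [hmin] at hg hp ⊢
      simp only [List.take_succ_cons] at hg hp ⊢
      have hg0 := hg g (List.mem_cons_self ..)
      have hp0 := hp p (List.mem_cons_self ..)
      obtain ⟨h1, h2⟩ := ih bs ts gs ps vs ss
        (fun x hx => hg x (List.mem_cons_of_mem _ hx))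
        (fun x hx => hp x (List.mem_cons_of_mem _ hx))
      constructor
      · simp only [List.map_cons, List.zipWith_cons_cons, List.replicate_succ, pyTranspose9,
          pyZip7, h1]
        simp [rowOf, pyMkRow, labelAt_eq_idToLabel g hg0.1 hg0.2,
          labelAt_eq_idToLabel p hp0.1 hp0.2]
      · simp only [List.zipWith_cons_cons, pyZip7, List.map_cons, h2]
        simp [flagOf]

-- selecting rows by the precomputed flag column equals filtering the tuples then mapping
theorem zip_select_eq (sn : String)
    (Z : List (String × String × String × Int × Int × String × String)) :
    ((((Z.map (rowOf sn)).zip (Z.map flagOf)).filter (fun rf => rf.2 == "1")).map (·.1))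
      = (Z.filter (fun t => decide (t.2.2.2.1 ≠ t.2.2.2.2.1))).map (rowOf sn) := by
  induction Z with
  | nil => simp
  | cons t rest ih =>
      simp only [List.map_cons, List.zip_cons_cons, List.filter_cons]
      by_cases h : t.2.2.2.1 = t.2.2.2.2.1 <;> simp [flagOf, h, ih]

-- ===== VERDICT (by name: the statement is the Claim_ definition above) =====
theorem build_prediction_rows_spec : Claim_equal_build_prediction_rows := by
  intro ids base_ids texts gold_labels pred_labels split_name text_variants slang_labels _ hpre
  obtain ⟨hg, hp⟩ := hpre
  show build_prediction_rows _ _ _ _ _ _ _ _ = build_prediction_rows_alt _ _ _ _ _ _ _ _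
  obtain ⟨h1, h2⟩ := transpose_eq split_name ids base_ids texts gold_labels pred_labels
    text_variants slang_labels hg hp
  rw [build_prediction_rows, build_prediction_rows_alt, foldl_rows]
  simp only [List.nil_append]
  rw [h1, h2, zip_select_eq]
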